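-- pv_equiv track=rewrite | github.com/crab-a/Hw01 | Statistics.py | filter_by_treatment
-- ===== SOURCE A (Python) =====
-- def filter_by_treatment(data, treatment, threshold):
--     """
--     split the data based on given threshold about a feature(treatment)
--     :param:
--     data,
--     treatment,
--     threshold,
--     :return:
--     two dict: one with all values above the threshold the other with the rest (below and equal)
--     """
--     above = {}
--     below = {}
--     for key in data.keys():
--         above[key] = []
--         below[key] = []
--     for index, value in enumerate(data[treatment]):
--         if value > threshold:
--             for key in above.keys():
--                 above[key].append(data[key][index])
--         else:
--             for key in below.keys():
--                 below[key].append(data[key][index])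
--     return above, below
-- ===== SOURCE B (Python) =====
-- def filter_by_treatment(data, treatment, threshold):
--     above_idx = []
--     below_idx = []
--     for i, v in enumerate(data[treatment]):
--         (above_idx if v > threshold else below_idx).append(i)
--     above = {key: [data[key][i] for i in above_idx] for key in data}
--     below = {key: [data[key][i] for i in below_idx] for key in data}
--     return above, below
-- ===== Notes on version B (the rewrite author's own statement) =====
-- stated objective: alternative
-- what changed: Instead of initializing per-key accumulator dicts and appending to every column inside the row loop, B makes one pass over the treatment column to build two index lists and then reconstructs each output column by indexing, via two dict comprehensions.
import Mathlib
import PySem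

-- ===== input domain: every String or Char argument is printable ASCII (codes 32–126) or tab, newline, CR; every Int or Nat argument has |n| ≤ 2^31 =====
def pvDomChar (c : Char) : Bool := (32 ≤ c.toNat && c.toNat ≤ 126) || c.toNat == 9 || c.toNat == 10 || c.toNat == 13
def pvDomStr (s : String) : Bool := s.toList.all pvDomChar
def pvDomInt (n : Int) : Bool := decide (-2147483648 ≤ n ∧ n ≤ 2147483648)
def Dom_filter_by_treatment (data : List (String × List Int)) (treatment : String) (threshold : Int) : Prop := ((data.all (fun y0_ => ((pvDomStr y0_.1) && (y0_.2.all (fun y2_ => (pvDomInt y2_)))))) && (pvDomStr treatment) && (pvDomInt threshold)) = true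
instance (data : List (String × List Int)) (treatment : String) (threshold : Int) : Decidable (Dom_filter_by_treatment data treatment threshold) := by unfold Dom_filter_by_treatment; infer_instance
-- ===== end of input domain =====

-- B replaces A's interleaved append-per-row dict building with an index-table pass plus per-column reconstruction ('alternative', same cost).
-- Both ports share the subscript helper pvColAt = data[key][index] (pure element access, not algorithm).
def pvColAt (data : List (String × List Int)) (k : String) (i : Int) : Int :=
  (PySem.List.pyGet? ((PySem.Dict.get? (PySem.Dict.mk data) k).getD []) i).getD 0

-- ===== PORT A =====
def filter_by_treatment (data : List (String × List Int)) (treatment : String) (threshold : Int) : (List (String × List Int)) × (List (String × List Int)) :=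
  let d : PySem.Dict String (List Int) := PySem.Dict.mk data
  let above0 : PySem.Dict String (List Int) := d.keys.foldl (fun a k => a.insert k []) (PySem.Dict.mk [])
  let below0 : PySem.Dict String (List Int) := d.keys.foldl (fun a k => a.insert k []) (PySem.Dict.mk [])
  let col : List Int := (d.get? treatment).getD []
  let r := (PySem.List.enumerate col 0).foldl
    (fun (p : PySem.Dict String (List Int) × PySem.Dict String (List Int)) iv =>
      if iv.2 > threshold then
        (p.1.keys.foldl (fun a k => a.modify k [] (fun l => l ++ [pvColAt data k iv.1])) p.1, p.2)
      else
        (p.1, p.2.keys.foldl (fun a k => a.modify k [] (fun l => l ++ [pvColAt data k iv.1])) p.2))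
    (above0, below0)
  (r.1.items, r.2.items)

-- ===== PORT B =====
def filter_by_treatment_alt (data : List (String × List Int)) (treatment : String) (threshold : Int) : (List (String × List Int)) × (List (String × List Int)) :=
  let col : List Int := (PySem.Dict.get? (PySem.Dict.mk data) treatment).getD []
  let idx := (PySem.List.enumerate col 0).foldl
    (fun (p : List Int × List Int) iv =>
      if iv.2 > threshold then (p.1 ++ [iv.1], p.2) else (p.1, p.2 ++ [iv.1]))
    ([], [])
  (data.map (fun kv => (kv.1, idx.1.map (fun i => pvColAt data kv.1 i))),
   data.map (fun kv => (kv.1, idx.2.map (fun i => pvColAt data kv.1 i))))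

-- ===== PRECONDITION & SPEC =====
-- Pre_ excludes: duplicate keys (a Python dict cannot hold them, so the association-list form is outside A's real input space;
-- on the dict both programs agree anyway), a treatment key absent from data (A raises KeyError), and columns shorter than the
-- treatment column (A raises IndexError on data[key][index]).
def Pre_filter_by_treatment (data : List (String × List Int)) (treatment : String) (threshold : Int) : Prop :=
  (data.map Prod.fst).Nodup ∧ treatment ∈ data.map Prod.fst ∧
  ∀ p ∈ data, ((data.lookup treatment).getD []).length ≤ p.2.length
instance (data : List (String × List Int)) (treatment : String) (threshold : Int) : Decidable (Pre_filter_by_treatment data treatment threshold) := by unfold Pre_filter_by_treatment; infer_instance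

def pvWitness_filter_by_treatment : (List (String × List Int)) × String × Int :=
  ([("a", [1, 3]), ("b", [5, 6])], "a", 2)

def Spec_filter_by_treatment (data : List (String × List Int)) (treatment : String) (threshold : Int) (out : (List (String × List Int)) × (List (String × List Int))) : Prop := out = filter_by_treatment_alt data treatment threshold
instance (data : List (String × List Int)) (treatment : String) (threshold : Int) (out : (List (String × List Int)) × (List (String × List Int))) : Decidable (Spec_filter_by_treatment data treatment threshold out) := by unfold Spec_filter_by_treatment; infer_instance

-- ===== CLAIM (what is proved, stated in full; the proofs are below) =====
def Claim_equal_filter_by_treatment : Prop := ∀ (data : List (String × List Int)) (treatment : String) (threshold : Int), Dom_filter_by_treatment data treatment threshold → Pre_filter_by_treatment data treatment threshold → Spec_filter_by_treatment data treatment threshold (filter_by_treatment data treatment threshold)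

-- ===== LEMMAS AND PROOFS =====

-- B's index-pair fold computes the filtered index lists.
lemma pvIdxFold (th : Int) (rows : List (Int × Int)) (a b : List Int) :
    rows.foldl
      (fun (p : List Int × List Int) iv =>
        if iv.2 > th then (p.1 ++ [iv.1], p.2) else (p.1, p.2 ++ [iv.1])) (a, b)
    = (a ++ (rows.filter (fun iv => decide (iv.2 > th))).map (·.1),
       b ++ (rows.filter (fun iv => !decide (iv.2 > th))).map (·.1)) := by
  induction rows generalizing a b with
  | nil => simp
  | cons r rs ih =>
    by_cases h : r.2 > th <;> simp [h, ih, List.append_assoc]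

-- A's inner "for key in d.keys(): d[key].append(x(key))" loop: keys are preserved.
lemma pvModifyLoopKeys (K : List String) (D : PySem.Dict String (List Int))
    (x : String → Int)
    (hK : ∀ k ∈ K, k ∈ D.keys) :
    (K.foldl (fun a k => a.modify k [] (fun l => l ++ [x k])) D).keys = D.keys := by
  induction K generalizing D with
  | nil => rfl
  | cons k K ih =>
    have hk : k ∈ D.keys := hK k (by simp)
    have hc : D.contains k = true := by
      simpa [PySem.Dict.contains_iff_mem_keys] using hk
    have hkeys : (D.modify k [] (fun l => l ++ [x k])).keys = D.keys := by
      simp [PySem.Dict.keys_modify, hc, PySem.Dict.keys_insert_of_contains]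
    rw [List.foldl_cons, ih _ (by intro q hq; rw [hkeys]; exact hK q (by simp [hq])), hkeys]

-- A's inner loop: pointwise value after the loop (append for visited keys).
lemma pvModifyLoopGetD (K : List String) (D : PySem.Dict String (List Int))
    (x : String → Int) (q : String) (hnd : K.Nodup) :
    (K.foldl (fun a k => a.modify k [] (fun l => l ++ [x k])) D).getD q []
    = if q ∈ K then D.getD q [] ++ [x q] else D.getD q [] := by
  induction K generalizing D with
  | nil => simp
  | cons k K ih =>
    rw [List.foldl_cons, ih _ (List.Nodup.of_cons hnd)]
    by_cases hqk : q = k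
    · subst hqk
      have hqK : q ∉ K := (List.nodup_cons.mp hnd).1
      simp [hqK, PySem.Dict.getD_modify_self]
    · simp [PySem.Dict.getD_modify, hqk]

-- A's row loop: keys stay the data keys and each value accumulates the filtered column entries.
lemma pvRowLoop (data : List (String × List Int)) (th : Int)
    (rows : List (Int × Int)) (Da Db : PySem.Dict String (List Int))
    (hA : Da.keys = data.map Prod.fst) (hB : Db.keys = data.map Prod.fst)
    (hnd : (data.map Prod.fst).Nodup) :
    let r := rows.foldl
      (fun (p : PySem.Dict String (List Int) × PySem.Dict String (List Int)) iv =>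
        if iv.2 > th then
          (p.1.keys.foldl (fun a k => a.modify k [] (fun l => l ++ [pvColAt data k iv.1])) p.1, p.2)
        else
          (p.1, p.2.keys.foldl (fun a k => a.modify k [] (fun l => l ++ [pvColAt data k iv.1])) p.2))
      (Da, Db)
    r.1.keys = data.map Prod.fst ∧ r.2.keys = data.map Prod.fst ∧
    (∀ q ∈ data.map Prod.fst,
      r.1.getD q [] = Da.getD q []
        ++ ((rows.filter (fun iv => decide (iv.2 > th))).map (fun iv => pvColAt data q iv.1))) ∧
    (∀ q ∈ data.map Prod.fst,
      r.2.getD q [] = Db.getD q []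
        ++ ((rows.filter (fun iv => !decide (iv.2 > th))).map (fun iv => pvColAt data q iv.1))) := by
  induction rows generalizing Da Db with
  | nil => simp [hA, hB]
  | cons r rs ih =>
    by_cases h : r.2 > th
    · have hkeys : (Da.keys.foldl (fun a k => a.modify k [] (fun l => l ++ [pvColAt data k r.1])) Da).keys = data.map Prod.fst := by
        rw [pvModifyLoopKeys _ _ _ (fun k hk => hk), hA]
      obtain ⟨h1, h2, h3, h4⟩ := ih _ _ hkeys hB
      refine ⟨by simpa [h] using h1, by simpa [h] using h2, ?_, ?_⟩
      · intro q hq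
        have h3q := h3 q hq
        rw [pvModifyLoopGetD _ _ _ _ (hA ▸ hnd)] at h3q
        rw [if_pos (show q ∈ Da.keys by rw [hA]; exact hq)] at h3q
        simp only [List.foldl_cons]
        rw [if_pos h, h3q]
        simp [h, List.append_assoc]
      · intro q hq
        simp only [List.foldl_cons]
        rw [if_pos h]
        simpa [h] using h4 q hq
    · have hkeys : (Db.keys.foldl (fun a k => a.modify k [] (fun l => l ++ [pvColAt data k r.1])) Db).keys = data.map Prod.fst := by
        rw [pvModifyLoopKeys _ _ _ (fun k hk => hk), hB]
      obtain ⟨h1, h2, h3, h4⟩ := ih _ _ hA hkeys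
      refine ⟨by simpa [h] using h1, by simpa [h] using h2, ?_, ?_⟩
      · intro q hq
        simp only [List.foldl_cons]
        rw [if_neg h]
        simpa [h] using h3 q hq
      · intro q hq
        have h4q := h4 q hq
        rw [pvModifyLoopGetD _ _ _ _ (hB ▸ hnd)] at h4q
        rw [if_pos (show q ∈ Db.keys by rw [hB]; exact hq)] at h4q
        simp only [List.foldl_cons]
        rw [if_neg h, h4q]
        simp [h, List.append_assoc]

-- A's initialization loop builds the dict {k: [] for k in keys}.
lemma pvInitItems (ks : List String) (hnd : ks.Nodup) :
    (ks.foldl (fun (a : PySem.Dict String (List Int)) k => a.insert k []) (PySem.Dict.mk [])).items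
    = ks.map (fun k => (k, ([] : List Int))) := by
  have := PySem.Dict.items_foldl_insert_fresh (l := ks) (k := fun k => k)
    (v := fun _ => ([] : List Int)) (d := PySem.Dict.mk [])
    (by intro a _; simp [PySem.Dict.contains_mk]) (by simpa using hnd)
  simpa using this

lemma pvInitKeys (ks : List String) (hnd : ks.Nodup) :
    (ks.foldl (fun (a : PySem.Dict String (List Int)) k => a.insert k []) (PySem.Dict.mk [])).keys
    = ks := by
  simp [PySem.Dict.keys, pvInitItems ks hnd, List.map_map, Function.comp_def]

lemma pvInitGetD (ks : List String) (hnd : ks.Nodup) (q : String) (hq : q ∈ ks) :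
    (ks.foldl (fun (a : PySem.Dict String (List Int)) k => a.insert k []) (PySem.Dict.mk [])).getD q []
    = [] := by
  apply PySem.Dict.getD_of_mem_items
  · rw [pvInitItems ks hnd]
    exact List.mem_map.mpr ⟨q, hq, rfl⟩
  · rw [pvInitKeys ks hnd]; exact hnd

-- ===== VERDICT (by name: the statement is the Claim_ definition above) =====
theorem filter_by_treatment_spec : Claim_equal_filter_by_treatment := by
  intro data treatment threshold _ hpre
  obtain ⟨hnd, -, -⟩ := hpre
  unfold Spec_filter_by_treatment filter_by_treatment filter_by_treatment_alt
  dsimp only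
  have hdk : (PySem.Dict.mk data).keys = data.map Prod.fst := by
    simp [PySem.Dict.keys]
  rw [hdk, pvIdxFold]
  dsimp only
  obtain ⟨h1, h2, h3, h4⟩ := pvRowLoop data threshold
    (PySem.List.enumerate (((PySem.Dict.mk data).get? treatment).getD []) 0)
    ((data.map Prod.fst).foldl (fun a k => a.insert k []) (PySem.Dict.mk []))
    ((data.map Prod.fst).foldl (fun a k => a.insert k []) (PySem.Dict.mk []))
    (pvInitKeys _ hnd) (pvInitKeys _ hnd) hnd
  refine Prod.ext ?_ ?_
  · show _ = data.map _
    rw [PySem.Dict.items_eq_map_keys _ (by rw [h1]; exact hnd) ([] : List Int), h1, List.map_map]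
    apply List.map_congr_left
    intro kv hk
    have hk1 : kv.1 ∈ data.map Prod.fst := List.mem_map.mpr ⟨kv, hk, rfl⟩
    simp only [Function.comp_def]
    rw [h3 kv.1 hk1, pvInitGetD _ hnd kv.1 hk1]
    simp [List.map_map]
  · show _ = data.map _
    have hn2 := hnd
    rw [← h2] at hn2
    rw [PySem.Dict.items_eq_map_keys _ hn2 ([] : List Int), h2, List.map_map]
    apply List.map_congr_left
    intro kv hk
    have hk1 : kv.1 ∈ data.map Prod.fst := List.mem_map.mpr ⟨kv, hk, rfl⟩
    simp only [Function.comp_def]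
    rw [h4 kv.1 hk1, pvInitGetD _ hnd kv.1 hk1]
    simp [List.map_map]
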